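-- pv_equiv track=rewrite | github.com/Koojunhui/code-test | kakao/2023kakao/Lv2이모티콘할인행사/해설.py | solution
-- ===== SOURCE A (Python) =====
-- from itertools import product
--
-- def solution(users, emoticons):
--     discounts = [10, 20, 30, 40]
--     m = len(emoticons)
--
--     # 미리 이모티콘별 할인가격 표를 만들어두면 반복 계산을 줄일 수 있음.
--     # discounted[i][k] = i번 이모티콘을 discounts[k]% 할인했을 때의 가격
--     discounted = [
--         [price * (100 - d) // 100 for d in discounts]
--         for price in emoticons
--     ]
--
--     best_subs, best_revenue = -1, -1
--
--     # 각 이모티콘에 적용할 할인율 인덱스(0..3)를 곱집합으로 전부 시도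
--     # 데카르트 곱
--     for choice in product(range(4), repeat=m):
--         subs, revenue = 0, 0
--
--         # 모든 사용자에 대해 구매/가입 판단
--         for min_rate, limit in users:
--             spend = 0
--             for i, idx in enumerate(choice):
--                 d = discounts[idx]
--                 if d >= min_rate:            # 기준 이상 할인된 이모티콘은 구매
--                     spend += discounted[i][idx]
--
--             if spend >= limit:               # 한도 이상이면 플러스 가입
--                 subs += 1
--             else:                             # 아니면 매출에 더함
--                 revenue += spend
--
--         # 가입자 우선, 동률이면 매출 큰 쪽으로 갱신
--         if subs > best_subs or (subs == best_subs and revenue > best_revenue):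
--             best_subs, best_revenue = subs, revenue
--
--     return [best_subs, best_revenue]
-- ===== SOURCE B (Python) =====
-- def solution(users, emoticons):
--     discounts = [10, 20, 30, 40]
--     m = len(emoticons)
--     discounted = [[price * (100 - d) // 100 for d in discounts] for price in emoticons]
--     best = [-1, -1]
--
--     def dfs(rows, spends):
--         if not rows:
--             subs, revenue = 0, 0
--             for (min_rate, limit), spend in zip(users, spends):
--                 if spend >= limit:
--                     subs += 1
--                 else:
--                     revenue += spend
--             if subs > best[0] or (subs == best[0] and revenue > best[1]):
--                 best[0], best[1] = subs, revenue
--             return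
--         row, rest = rows[0], rows[1:]
--         for idx in range(4):
--             d = discounts[idx]
--             price = row[idx]
--             dfs(rest, [s + (price if d >= mr else 0) for s, (mr, _) in zip(spends, users)])
--
--     dfs(discounted, [0] * len(users))
--     return best
-- ===== Notes on version B (the rewrite author's own statement) =====
-- stated objective: alternative
-- what changed: Replaces itertools.product enumeration with per-combination per-user spend recomputed from scratch by recursive backtracking over the emoticon rows that threads an incrementally accumulated per-user spend vector down the recursion, scoring against the limits only at the leaves.
import Mathlib
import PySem

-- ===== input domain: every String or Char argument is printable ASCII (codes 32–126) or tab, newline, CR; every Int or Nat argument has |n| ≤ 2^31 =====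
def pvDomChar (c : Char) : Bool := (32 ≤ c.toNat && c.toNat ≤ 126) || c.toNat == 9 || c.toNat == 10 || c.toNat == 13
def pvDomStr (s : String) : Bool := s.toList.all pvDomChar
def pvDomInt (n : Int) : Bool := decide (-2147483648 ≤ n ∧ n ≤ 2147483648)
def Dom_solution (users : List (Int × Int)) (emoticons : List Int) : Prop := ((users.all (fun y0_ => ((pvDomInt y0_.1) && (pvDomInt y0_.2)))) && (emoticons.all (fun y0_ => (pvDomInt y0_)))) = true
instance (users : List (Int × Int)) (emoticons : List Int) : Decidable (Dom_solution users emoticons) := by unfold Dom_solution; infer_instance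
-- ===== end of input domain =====

-- B replaces A's itertools.product enumeration (per-combination, per-user spend recomputed
-- from scratch) by recursive backtracking that threads a per-user spend vector down the
-- recursion, accumulating each emoticon's contribution once per branch (objective: alternative).

-- ===== PORT A =====
-- product(range(4), repeat=m), tuples in itertools' lexicographic order (first slot slowest)
def pvProdRep : Nat → List (List Int)
  | 0 => [[]]
  | n + 1 => (PySem.List.pyRange 0 4 1).flatMap (fun d => (pvProdRep n).map (fun rest => d :: rest))

def solution (users : List (Int × Int)) (emoticons : List Int) : List Int :=
  let discounts : List Int := [10, 20, 30, 40]
  let m := emoticons.length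
  let discounted : List (List Int) :=
    emoticons.map (fun price => discounts.map (fun d => PySem.Int.floordiv (price * (100 - d)) 100))
  let best :=
    (pvProdRep m).foldl
      (fun (best : Int × Int) choice =>
        let sr :=
          users.foldl
            (fun (sr : Int × Int) u =>
              let spend :=
                (PySem.List.enumerate choice).foldl
                  (fun (spend : Int) p =>
                    let d := PySem.List.pyGetD discounts p.2 0
                    if d ≥ u.1 then
                      spend + PySem.List.pyGetD (PySem.List.pyGetD discounted p.1 []) p.2 0
                    else spend) 0
              if spend ≥ u.2 then (sr.1 + 1, sr.2) else (sr.1, sr.2 + spend))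
            (0, 0)
        if sr.1 > best.1 ∨ (sr.1 = best.1 ∧ sr.2 > best.2) then sr else best)
      (-1, -1)
  [best.1, best.2]

-- ===== PORT B =====
def pvLeafScore (users : List (Int × Int)) (spends : List Int) : Int × Int :=
  (users.zip spends).foldl
    (fun (sr : Int × Int) p => if p.2 ≥ p.1.2 then (sr.1 + 1, sr.2) else (sr.1, sr.2 + p.2))
    (0, 0)

def pvDfs (users : List (Int × Int)) (discounts : List Int) :
    List (List Int) → List Int → Int × Int → Int × Int
  | [], spends, best =>
      let sr := pvLeafScore users spends
      if sr.1 > best.1 ∨ (sr.1 = best.1 ∧ sr.2 > best.2) then sr else best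
  | row :: rest, spends, best =>
      (PySem.List.pyRange 0 4 1).foldl
        (fun b idx =>
          let d := PySem.List.pyGetD discounts idx 0
          let price := PySem.List.pyGetD row idx 0
          pvDfs users discounts rest
            (List.zipWith (fun s u => s + (if d ≥ u.1 then price else 0)) spends users) b)
        best

def solution_alt (users : List (Int × Int)) (emoticons : List Int) : List Int :=
  let discounts : List Int := [10, 20, 30, 40]
  let discounted : List (List Int) :=
    emoticons.map (fun price => discounts.map (fun d => PySem.Int.floordiv (price * (100 - d)) 100))
  let best := pvDfs users discounts discounted (List.replicate users.length 0) (-1, -1)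
  [best.1, best.2]

-- ===== PRECONDITION & SPEC =====
def Spec_solution (users : List (Int × Int)) (emoticons : List Int) (out : List Int) : Prop := out = solution_alt users emoticons
instance (users : List (Int × Int)) (emoticons : List Int) (out : List Int) : Decidable (Spec_solution users emoticons out) := by unfold Spec_solution; infer_instance

-- ===== CLAIM (what is proved, stated in full; the proofs are below) =====
def Claim_equal_solution : Prop := ∀ (users : List (Int × Int)) (emoticons : List Int), Dom_solution users emoticons → Spec_solution users emoticons (solution users emoticons)

-- ===== LEMMAS AND PROOFS =====

-- contribution of one emoticon (price row `row`, discount index `idx`) to user u's spend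
def pvContrib (discounts row : List Int) (idx : Int) (u : Int × Int) : Int :=
  if PySem.List.pyGetD discounts idx 0 ≥ u.1 then PySem.List.pyGetD row idx 0 else 0

-- total spend of user u over a list of (row, chosen index) pairs
def pvSpendSum (discounts : List Int) (l : List (List Int × Int)) (u : Int × Int) : Int :=
  (l.map (fun rc => pvContrib discounts rc.1 rc.2 u)).sum

-- B's spends accumulation over a list of (row, chosen index) pairs
def pvAccSp (users : List (Int × Int)) (discounts : List Int) :
    List (List Int × Int) → List Int → List Int
  | [], sp => sp
  | rc :: t, sp =>
      pvAccSp users discounts t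
        (List.zipWith (fun s u => s + pvContrib discounts rc.1 rc.2 u) sp users)

-- the shared best-update step
def pvUpd (b sr : Int × Int) : Int × Int :=
  if sr.1 > b.1 ∨ (sr.1 = b.1 ∧ sr.2 > b.2) then sr else b

theorem pvProdRep_length (n : Nat) : ∀ c ∈ pvProdRep n, c.length = n := by
  induction n with
  | zero => intro c hc; simp [pvProdRep] at hc; simp [hc]
  | succ n ih =>
      intro c hc
      simp only [pvProdRep, List.mem_flatMap, List.mem_map] at hc
      obtain ⟨d, -, rest, hrest, rfl⟩ := hc
      simp [ih rest hrest]

theorem pvDfs_eq (users : List (Int × Int)) (discounts : List Int) :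
    ∀ (rows : List (List Int)) (spends : List Int) (best : Int × Int),
      pvDfs users discounts rows spends best =
      (pvProdRep rows.length).foldl
        (fun b c => pvUpd b (pvLeafScore users (pvAccSp users discounts (rows.zip c) spends)))
        best := by
  intro rows
  induction rows with
  | nil =>
      intro spends best
      simp [pvDfs, pvProdRep, pvAccSp, pvUpd]
  | cons row rest ih =>
      intro spends best
      have h4 : PySem.List.pyRange 0 4 1 = [0, 1, 2, 3] := by decide
      simp only [pvDfs, h4, List.length_cons]
      show _ = (pvProdRep (rest.length + 1)).foldl _ best
      simp only [pvProdRep, h4, List.flatMap_cons, List.flatMap_nil, List.append_nil,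
        List.foldl_append, List.foldl_map, List.foldl_cons, List.foldl_nil]
      simp only [List.zip_cons_cons, pvAccSp]
      rw [ih, ih, ih, ih]
      simp only [pvContrib]

theorem pvZipWithMapLeftSelf (f : Int → (Int × Int) → Int) (g : (Int × Int) → Int) :
    ∀ (l : List (Int × Int)), List.zipWith f (l.map g) l = l.map (fun u => f (g u) u) := by
  intro l
  induction l with
  | nil => rfl
  | cons u us ih => simp [ih]

theorem pvAccSp_map (users : List (Int × Int)) (discounts : List Int) :
    ∀ (l : List (List Int × Int)) (g : (Int × Int) → Int),
      pvAccSp users discounts l (users.map g) =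
      users.map (fun u => g u + pvSpendSum discounts l u) := by
  intro l
  induction l with
  | nil => intro g; simp [pvAccSp, pvSpendSum]
  | cons rc t ih =>
      intro g
      rw [pvAccSp, pvZipWithMapLeftSelf (fun s u => s + pvContrib discounts rc.1 rc.2 u) g users, ih]
      simp [pvSpendSum, add_assoc]

theorem pvLeafScore_map (users : List (Int × Int)) (f : (Int × Int) → Int) :
    pvLeafScore users (users.map f) =
    users.foldl
      (fun (sr : Int × Int) u => if f u ≥ u.2 then (sr.1 + 1, sr.2) else (sr.1, sr.2 + f u))
      (0, 0) := by
  unfold pvLeafScore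
  suffices h : ∀ (init : Int × Int),
      (users.zip (users.map f)).foldl
        (fun (sr : Int × Int) p => if p.2 ≥ p.1.2 then (sr.1 + 1, sr.2) else (sr.1, sr.2 + p.2)) init =
      users.foldl
        (fun (sr : Int × Int) u => if f u ≥ u.2 then (sr.1 + 1, sr.2) else (sr.1, sr.2 + f u)) init by
    exact h (0, 0)
  induction users with
  | nil => intro init; rfl
  | cons u us ih => intro init; simp only [List.map_cons, List.zip_cons_cons, List.foldl_cons, ih]

-- A's per-user spend loop (enumerate + indexing into `all`) equals the zip-of-rows sum B accumulates
theorem pvEnum_spend (discounts : List Int) (all : List (List Int)) (u : Int × Int) :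
    ∀ (c : List Int) (k : Nat) (acc : Int), k + c.length ≤ all.length →
      (PySem.List.enumerate c k).foldl
        (fun (spend : Int) p =>
          if PySem.List.pyGetD discounts p.2 0 ≥ u.1 then
            spend + PySem.List.pyGetD (PySem.List.pyGetD all p.1 []) p.2 0
          else spend) acc =
      ((all.drop k).zip c).foldl (fun s rc => s + pvContrib discounts rc.1 rc.2 u) acc := by
  intro c
  induction c with
  | nil => intro k acc _; simp [PySem.List.enumerate_nil]
  | cons idx c' ih =>
      intro k acc hk
      have hklt : k < all.length := by simp at hk; omega
      rw [PySem.List.enumerate_cons, List.foldl_cons]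
      have hdrop : all.drop k = all[k] :: all.drop (k + 1) := List.drop_eq_getElem_cons hklt
      rw [hdrop, List.zip_cons_cons, List.foldl_cons]
      have hget : PySem.List.pyGetD all ((k : Int)) ([] : List Int) = all[k] := by
        simp [PySem.List.pyGetD_natCast, List.getElem?_eq_getElem hklt]
      have hstep :
          (if PySem.List.pyGetD discounts idx 0 ≥ u.1 then
            acc + PySem.List.pyGetD (PySem.List.pyGetD all ((k : Int)) []) idx 0
          else acc) = acc + pvContrib discounts all[k] idx u := by
        rw [hget]; unfold pvContrib; split <;> simp
      rw [hstep]
      have := ih (k + 1) (acc + pvContrib discounts all[k] idx u) (by simp at hk ⊢; omega)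
      simpa using this

-- ===== VERDICT (by name: the statement is the Claim_ definition above) =====
theorem pvMain (users : List (Int × Int)) (emoticons : List Int) :
    (pvProdRep emoticons.length).foldl
      (fun (best : Int × Int) choice =>
        let sr :=
          users.foldl
            (fun (sr : Int × Int) u =>
              let spend :=
                (PySem.List.enumerate choice).foldl
                  (fun (spend : Int) p =>
                    let d := PySem.List.pyGetD ([10, 20, 30, 40] : List Int) p.2 0
                    if d ≥ u.1 then
                      spend + PySem.List.pyGetD
                        (PySem.List.pyGetD
                          (emoticons.map (fun price =>
                            ([10, 20, 30, 40] : List Int).map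
                              (fun d => PySem.Int.floordiv (price * (100 - d)) 100)))
                          p.1 []) p.2 0
                    else spend) 0
              if spend ≥ u.2 then (sr.1 + 1, sr.2) else (sr.1, sr.2 + spend))
            (0, 0)
        if sr.1 > best.1 ∨ (sr.1 = best.1 ∧ sr.2 > best.2) then sr else best)
      (-1, -1) =
    pvDfs users ([10, 20, 30, 40] : List Int)
      (emoticons.map (fun price =>
        ([10, 20, 30, 40] : List Int).map (fun d => PySem.Int.floordiv (price * (100 - d)) 100)))
      (List.replicate users.length 0) (-1, -1) := by
  set discounts : List Int := [10, 20, 30, 40] with hdiscounts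
  set discounted : List (List Int) :=
    emoticons.map (fun price => discounts.map (fun d => PySem.Int.floordiv (price * (100 - d)) 100))
    with hdiscounted
  have hlen : discounted.length = emoticons.length := by simp [hdiscounted]
  have hrepl : List.replicate users.length (0 : Int) = users.map (fun _ => 0) := by
    simp [List.map_const']
  rw [hrepl, pvDfs_eq, hlen]
  apply PySem.List.foldl_congr_mem
  intro b c hc
  have hclen : c.length = emoticons.length := pvProdRep_length _ c hc
  have hspend : ∀ u : (Int × Int),
      (PySem.List.enumerate c 0).foldl
        (fun (spend : Int) p =>
          if PySem.List.pyGetD discounts p.2 0 ≥ u.1 then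
            spend + PySem.List.pyGetD (PySem.List.pyGetD discounted p.1 []) p.2 0
          else spend) 0 =
      pvSpendSum discounts (discounted.zip c) u := by
    intro u
    have h := pvEnum_spend discounts discounted u c 0 0 (by omega)
    simp only [Nat.cast_zero, List.drop_zero] at h
    rw [h, PySem.List.foldl_add]
    simp [pvSpendSum]
  have hB : pvAccSp users discounts (discounted.zip c) (users.map (fun _ => 0)) =
      users.map (fun u => pvSpendSum discounts (discounted.zip c) u) := by
    rw [pvAccSp_map]; simp
  have hsr :
      users.foldl
        (fun (sr : Int × Int) u =>
          let spend :=
            (PySem.List.enumerate c).foldl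
              (fun (spend : Int) p =>
                let d := PySem.List.pyGetD discounts p.2 0
                if d ≥ u.1 then
                  spend + PySem.List.pyGetD (PySem.List.pyGetD discounted p.1 []) p.2 0
                else spend) 0
          if spend ≥ u.2 then (sr.1 + 1, sr.2) else (sr.1, sr.2 + spend))
        (0, 0) =
      users.foldl
        (fun (sr : Int × Int) u =>
          if pvSpendSum discounts (discounted.zip c) u ≥ u.2 then (sr.1 + 1, sr.2)
          else (sr.1, sr.2 + pvSpendSum discounts (discounted.zip c) u))
        (0, 0) := by
    apply PySem.List.foldl_congr_mem
    intro sr u _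
    show (if (PySem.List.enumerate c 0).foldl
            (fun (spend : Int) p =>
              if PySem.List.pyGetD discounts p.2 0 ≥ u.1 then
                spend + PySem.List.pyGetD (PySem.List.pyGetD discounted p.1 []) p.2 0
              else spend) 0 ≥ u.2
          then (sr.1 + 1, sr.2)
          else (sr.1, sr.2 + (PySem.List.enumerate c 0).foldl
              (fun (spend : Int) p =>
                if PySem.List.pyGetD discounts p.2 0 ≥ u.1 then
                  spend + PySem.List.pyGetD (PySem.List.pyGetD discounted p.1 []) p.2 0
                else spend) 0)) = _
    rw [hspend u]
  rw [hB, pvLeafScore_map]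
  simp only [pvUpd]
  rw [hsr]

theorem solution_spec : Claim_equal_solution := by
  intro users emoticons _
  exact congrArg (fun p : Int × Int => [p.1, p.2]) (pvMain users emoticons)
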